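-- pv_equiv track=rewrite | github.com/redsquad-tech/ner | bert_ner_core.py | get_all_dimensions
-- ===== SOURCE A (Python) =====
-- from typing import List, Tuple, Union, Dict, Sized, Sequence, Optional
--
-- def get_all_dimensions(batch: Sequence, level: int = 0, res: Optional[List[List[int]]] = None) -> List[List[int]]:
--     if not level:
--         res = [[len(batch)]]
--     if len(batch) and isinstance(batch[0], Sized) and not isinstance(batch[0], str):
--         level += 1
--         if len(res) <= level:
--             res.append([])
--         for item in batch:
--             res[level].append(len(item))
--             get_all_dimensions(item, level, res)
--     return res
-- ===== SOURCE B (Python) =====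
-- from typing import List, Optional, Sequence, Sized
--
--
-- def get_all_dimensions(batch: Sequence, level: int = 0, res: Optional[List[List[int]]] = None) -> List[List[int]]:
--     # Iterative BFS over the nested structure with an explicit FIFO queue instead of recursion.
--     if not level:
--         res = [[len(batch)]]
--     queue = [(batch, level)]
--     head = 0
--     while head < len(queue):
--         node, lvl = queue[head]
--         head += 1
--         if len(node) and isinstance(node[0], Sized) and not isinstance(node[0], str):
--             nl = lvl + 1
--             if len(res) <= nl:
--                 res.append([])
--             for item in node:
--                 res[nl].append(len(item))
--                 queue.append((item, nl))
--     return res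
-- ===== Notes on version B (the rewrite author's own statement) =====
-- stated objective: alternative
-- what changed: Replaces A's recursion over the nested structure by an iterative breadth-first traversal with an explicit FIFO queue seeded with (batch, level); per-level left-to-right order and the len(res)<=level growth check are preserved.
-- outside the precondition, e.g. on get_all_dimensions([], 1, None): A returns None, B returns None
import Mathlib
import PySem

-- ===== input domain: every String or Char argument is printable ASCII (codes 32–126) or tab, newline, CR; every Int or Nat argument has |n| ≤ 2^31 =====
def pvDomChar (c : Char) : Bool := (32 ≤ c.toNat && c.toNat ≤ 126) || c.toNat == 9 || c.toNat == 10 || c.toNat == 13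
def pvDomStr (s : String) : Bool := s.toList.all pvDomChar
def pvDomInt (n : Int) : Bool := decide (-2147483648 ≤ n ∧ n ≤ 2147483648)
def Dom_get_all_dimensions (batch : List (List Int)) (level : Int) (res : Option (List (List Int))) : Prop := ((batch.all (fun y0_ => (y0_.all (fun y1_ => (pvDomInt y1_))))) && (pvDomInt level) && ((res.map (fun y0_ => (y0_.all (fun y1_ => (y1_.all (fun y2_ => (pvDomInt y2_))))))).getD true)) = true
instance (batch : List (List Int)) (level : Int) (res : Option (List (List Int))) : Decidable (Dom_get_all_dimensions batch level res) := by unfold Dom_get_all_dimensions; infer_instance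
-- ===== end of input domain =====

-- B replaces A's recursion by an iterative BFS with an explicit FIFO queue (same cost, different
-- decomposition). Equivalence is about the RETURN value; Python A mutates the passed `res` in place.

-- ===== PORT A =====
-- Models the recursive call get_all_dimensions(item, level, res) for item : List Int, whose return
-- value Python discards: item's elements are ints, so `isinstance(item[0], Sized)` is False and the
-- callee never mutates res (with level == 0 it only rebinds a fresh local res); so res is unchanged.
def gad_rec (_item : List Int) (_level : Int) (r : List (List Int)) : List (List Int) := r

def get_all_dimensions (batch : List (List Int)) (level : Int) (res : Option (List (List Int))) : List (List Int) :=
  -- `if not level: res = [[len(batch)]]`; for level ≠ 0 with res = None Python either raises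
  -- TypeError at `len(res)` or returns None (not a List value): Pre_ excludes both, `.getD []` there.
  let res0 : List (List Int) := if level = 0 then [[(batch.length : Int)]] else res.getD []
  -- `len(batch) and isinstance(batch[0], Sized) and not isinstance(batch[0], str)`:
  -- batch[0] is a list (Sized, not a str), so the condition reduces to len(batch) ≠ 0.
  if batch.length ≠ 0 then
    let level1 := level + 1
    let res1 := if (res0.length : Int) ≤ level1 then res0 ++ [[]] else res0
    batch.foldl (fun r item =>
      -- res[level].append(len(item)): Python index (negative wraps); IndexError excluded by Pre_
      let r1 := PySem.List.pySetD r level1 (PySem.List.pyGetD r level1 [] ++ [(item.length : Int)])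
      gad_rec item level1 r1) res1
  else res0

-- ===== PORT B =====
-- BFS loop of Source B. Queue entries: the top-level batch (inl) or an inner item (inr), with its level.
-- The fuel argument only makes the recursion structural: 2 + len(batch) always suffices, since the
-- queue ever holds the root plus the items of batch (inner items enqueue nothing: their elements are
-- ints, so the `isinstance(node[0], Sized)` condition is False).
def gad_bfs : Nat → List ((List (List Int) ⊕ List Int) × Int) → List (List Int) → List (List Int)
  | 0, _, r => r
  | _ + 1, [], r => r
  | fuel + 1, (node, lvl) :: q, r =>
    match node with
    | Sum.inl b =>
      if b.length ≠ 0 then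
        let nl := lvl + 1
        let r1 := if (r.length : Int) ≤ nl then r ++ [[]] else r
        -- `for item in node: res[nl].append(len(item)); queue.append((item, nl))`
        let p := b.foldl
          (fun (st : List (List Int) × List ((List (List Int) ⊕ List Int) × Int)) item =>
            (PySem.List.pySetD st.1 nl (PySem.List.pyGetD st.1 nl [] ++ [(item.length : Int)]),
             st.2 ++ [(Sum.inr item, nl)])) (r1, q)
        gad_bfs fuel p.2 p.1
      else gad_bfs fuel q r
    | Sum.inr _ =>
      -- node's elements are ints: `isinstance(node[0], Sized)` is False, loop body skipped
      gad_bfs fuel q r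

def get_all_dimensions_alt (batch : List (List Int)) (level : Int) (res : Option (List (List Int))) : List (List Int) :=
  let res0 : List (List Int) := if level = 0 then [[(batch.length : Int)]] else res.getD []
  gad_bfs (batch.length + 2) [(Sum.inl batch, level)] res0

-- ===== PRECONDITION & SPEC =====
-- Pre_ excludes exactly the non-default entry points on which Python A raises (TypeError when
-- level ≠ 0 with res = None and batch nonempty; IndexError when res[level+1] is out of range) or
-- returns None instead of a list (level ≠ 0, res = None, batch empty).
def Pre_get_all_dimensions (batch : List (List Int)) (level : Int) (res : Option (List (List Int))) : Prop :=
  level = 0 ∨ (res.isSome = true ∧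
    (batch = [] ∨ (-(((res.getD []).length : Int)) ≤ level + 1 ∧ level + 1 ≤ (res.getD []).length)))
instance (batch : List (List Int)) (level : Int) (res : Option (List (List Int))) : Decidable (Pre_get_all_dimensions batch level res) := by unfold Pre_get_all_dimensions; infer_instance

def pvWitness_get_all_dimensions : List (List Int) × Int × Option (List (List Int)) := ([[1], [2, 3]], 0, none)

def Spec_get_all_dimensions (batch : List (List Int)) (level : Int) (res : Option (List (List Int))) (out : List (List Int)) : Prop := out = get_all_dimensions_alt batch level res
instance (batch : List (List Int)) (level : Int) (res : Option (List (List Int))) (out : List (List Int)) : Decidable (Spec_get_all_dimensions batch level res out) := by unfold Spec_get_all_dimensions; infer_instance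

-- ===== CLAIM (what is proved, stated in full; the proofs are below) =====
def Claim_equal_get_all_dimensions : Prop := ∀ (batch : List (List Int)) (level : Int) (res : Option (List (List Int))), Dom_get_all_dimensions batch level res → Pre_get_all_dimensions batch level res → Spec_get_all_dimensions batch level res (get_all_dimensions batch level res)

-- ===== LEMMAS AND PROOFS =====

-- Draining a queue that holds only inner items (inr) leaves res unchanged.
theorem gad_bfs_drain (its : List (List Int)) (nl : Int) :
    ∀ (fuel : Nat) (r : List (List Int)), its.length ≤ fuel →
      gad_bfs fuel (its.map (fun it => (Sum.inr it, nl))) r = r := by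
  induction its with
  | nil => intro fuel r _; cases fuel <;> simp [gad_bfs]
  | cons x xs ih =>
    intro fuel r h
    cases fuel with
    | zero => simp at h
    | succ f =>
      simp only [List.map_cons, gad_bfs]
      exact ih f r (by simpa using h)

-- The paired fold of B's inner loop splits into A's res-fold and the enqueued items.
theorem gad_fold_pair (b : List (List Int)) (nl : Int) :
    ∀ (r : List (List Int)) (q : List ((List (List Int) ⊕ List Int) × Int)),
      b.foldl
        (fun (st : List (List Int) × List ((List (List Int) ⊕ List Int) × Int)) item =>
          (PySem.List.pySetD st.1 nl (PySem.List.pyGetD st.1 nl [] ++ [(item.length : Int)]),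
           st.2 ++ [(Sum.inr item, nl)])) (r, q)
      = (b.foldl (fun r item =>
            PySem.List.pySetD r nl (PySem.List.pyGetD r nl [] ++ [(item.length : Int)])) r,
         q ++ b.map (fun it => (Sum.inr it, nl))) := by
  induction b with
  | nil => intro r q; simp
  | cons x xs ih =>
    intro r q
    simp only [List.foldl_cons, List.map_cons]
    rw [ih]
    simp

-- ===== VERDICT (by name: the statement is the Claim_ definition above) =====
theorem get_all_dimensions_spec : Claim_equal_get_all_dimensions := by
  intro batch level res _ _
  unfold Spec_get_all_dimensions get_all_dimensions get_all_dimensions_alt gad_rec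
  simp only [gad_bfs]
  by_cases hb : batch.length ≠ 0
  · rw [if_pos hb, if_pos hb, gad_fold_pair]
    exact (gad_bfs_drain batch (level + 1) (batch.length + 1) _ (by omega)).symm
  · have hb' : batch = [] := by simpa using hb
    subst hb'
    simp [gad_bfs]
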